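-- pv_equiv track=rewrite | github.com/lmrae0624/Algorithm | 프로그래머스/Test0409.py | solution
-- ===== SOURCE A (Python) =====
-- def solution(path):
--     answer=[]
--
--     def direc_check(now,next):
--         if now=='E':
--             if next=='N':
--                 return 'left'
--             else:
--                 return 'right'
--         elif now=='W':
--             if next=='S':
--                 return 'left'
--             else:
--                 return 'right'
--         elif now=='N':
--             if next=='W':
--                 return 'left'
--             else:
--                 return 'right'
--         else:
--             if next=='E':
--                 return 'left'
--             else:
--                 return 'right'
--
--     now=path[0]
--     time=0
--     count=1
--
--     for i in range(1,len(path)):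
--         time+=1
--         if now==path[i]:
--             count+=1
--         else:
--             if count>5:
--                 count=5
--             answer.append("Time "+str(time-count)+": Go straight "+str(count)+"00m and turn "+direc_check(now,path[i]))
--             count=1
--             now=path[i]
--
--     return answer
-- ===== SOURCE B (Python) =====
-- def solution(path):
--     def turn(a, b):
--         return 'left' if ((a, b) in {('E', 'N'), ('W', 'S'), ('N', 'W')}
--                           or (a not in 'EWN' and b == 'E')) else 'right'
--
--     # run-length encode the path: [(char, run length), ...]
--     runs = []
--     for c in path:
--         if runs and runs[-1][0] == c:
--             runs[-1][1] += 1
--         else: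
--             runs.append([c, 1])
--     answer = []
--     idx = 0
--     for (c1, n1), (c2, _) in zip(runs, runs[1:]):
--         idx += n1
--         cnt = min(n1, 5)
--         answer.append("Time " + str(idx - cnt) + ": Go straight " + str(cnt)
--                       + "00m and turn " + turn(c1, c2))
--     return answer
-- ===== Notes on version B (the rewrite author's own statement) =====
-- stated objective: alternative
-- what changed: B first run-length-encodes the path into (char, length) runs, then emits one report per adjacent pair of runs from cumulative run lengths, replacing A's single stateful character scan with now/time/count accumulators; the turn direction becomes a pair-set membership test.
import Mathlib
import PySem

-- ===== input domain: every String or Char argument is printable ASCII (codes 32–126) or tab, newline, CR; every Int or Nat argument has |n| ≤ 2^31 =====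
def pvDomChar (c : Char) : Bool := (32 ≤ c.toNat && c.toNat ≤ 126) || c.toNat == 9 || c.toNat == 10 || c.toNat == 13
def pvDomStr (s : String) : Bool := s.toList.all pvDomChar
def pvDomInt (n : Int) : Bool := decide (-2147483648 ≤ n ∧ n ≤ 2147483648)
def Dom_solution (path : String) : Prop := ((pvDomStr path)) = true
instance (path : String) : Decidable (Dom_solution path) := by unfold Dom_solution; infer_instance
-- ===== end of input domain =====

-- B replaces A's single stateful scan (now/time/count accumulators) by run-length
-- encoding the path and emitting one report per adjacent pair of runs (objective:
-- alternative decomposition, same cost).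

-- ===== PORT A =====
-- A's nested direc_check
def direcCheck (now next : Char) : String :=
  if now = 'E' then (if next = 'N' then "left" else "right")
  else if now = 'W' then (if next = 'S' then "left" else "right")
  else if now = 'N' then (if next = 'W' then "left" else "right")
  else (if next = 'E' then "left" else "right")

-- A's loop body: state (answer, now, time, count), ci = path[i]
def stepA (st : List String × Char × Int × Int) (ci : Char) : List String × Char × Int × Int :=
  let answer := st.1
  let now := st.2.1
  let time := st.2.2.1 + 1
  if now = ci then (answer, now, time, st.2.2.2 + 1)
  else
    let count := if st.2.2.2 > 5 then 5 else st.2.2.2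
    (answer ++ ["Time " ++ PySem.Int.toStr (time - count) ++ ": Go straight " ++
        PySem.Int.toStr count ++ "00m and turn " ++ direcCheck now ci],
     ci, time, 1)

def solution (path : String) : List String :=
  match PySem.Str.pyGet? path 0 with   -- now = path[0]; none = IndexError, outside Pre_
  | none => []
  | some c0 =>
    let cs := path.toList
    ((PySem.List.pyRange 1 (PySem.List.len cs) 1).foldl
      (fun st i => stepA st (PySem.List.pyGetD cs i ' '))
      ([], c0, (0 : Int), (1 : Int))).1

-- ===== PORT B =====
-- B's turn: membership of (a,b) in the 'left' pair set, or a off the compass and b = 'E'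
def turnB (a b : Char) : String :=
  if (a = 'E' ∧ b = 'N') ∨ (a = 'W' ∧ b = 'S') ∨ (a = 'N' ∧ b = 'W') ∨
     (¬ (a = 'E' ∨ a = 'W' ∨ a = 'N') ∧ b = 'E') then "left" else "right"

-- runs.append([c,1]) / runs[-1][1] += 1
def addRun (runs : List (Char × Int)) (c : Char) : List (Char × Int) :=
  match runs.getLast? with
  | some (c', n) => if c' = c then runs.dropLast ++ [(c', n + 1)] else runs ++ [(c, 1)]
  | none => [(c, 1)]

-- B's report loop body: state (idx, answer), pr = ((c1, n1), (c2, n2))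
def stepB (st : Int × List String) (pr : (Char × Int) × (Char × Int)) : Int × List String :=
  let idx := st.1 + pr.1.2
  let cnt := min pr.1.2 5
  (idx, st.2 ++ ["Time " ++ PySem.Int.toStr (idx - cnt) ++ ": Go straight " ++
      PySem.Int.toStr cnt ++ "00m and turn " ++ turnB pr.1.1 pr.2.1])

def solution_alt (path : String) : List String :=
  let runs := path.toList.foldl addRun []
  ((runs.zip runs.tail).foldl stepB ((0 : Int), ([] : List String))).2

-- ===== PRECONDITION & SPEC =====
-- A indexes path[0]: the empty string (IndexError) is the only excluded input.
def Pre_solution (path : String) : Prop := path ≠ ""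
instance (path : String) : Decidable (Pre_solution path) := by unfold Pre_solution; infer_instance
def pvWitness_solution : String := "EEENWW"

def Spec_solution (path : String) (out : List String) : Prop := out = solution_alt path
instance (path : String) (out : List String) : Decidable (Spec_solution path out) := by unfold Spec_solution; infer_instance

-- ===== CLAIM (what is proved, stated in full; the proofs are below) =====
def Claim_equal_solution : Prop := ∀ (path : String), Dom_solution path → Pre_solution path → Spec_solution path (solution path)

-- ===== LEMMAS AND PROOFS =====

-- canonical run-length encoding of (c repeated n) ++ cs, merging the open run (c, n)
def rleCont (c : Char) (n : Int) : List Char → List (Char × Int)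
  | [] => [(c, n)]
  | d :: cs => if c = d then rleCont c (n + 1) cs else (c, n) :: rleCont d 1 cs

-- canonical pair-by-pair report list, idx = absolute start index of the first run
def pairsRec (idx : Int) : List (Char × Int) → List String
  | (c1, n1) :: (c2, n2) :: rs =>
      ("Time " ++ PySem.Int.toStr (idx + n1 - min n1 5) ++ ": Go straight " ++
        PySem.Int.toStr (min n1 5) ++ "00m and turn " ++ direcCheck c1 c2) ::
      pairsRec (idx + n1) ((c2, n2) :: rs)
  | _ => []

theorem turnB_eq (a b : Char) : turnB a b = direcCheck a b := by
  unfold turnB direcCheck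
  split_ifs <;> simp_all

theorem rleCont_head (cs : List Char) (c : Char) (n : Int) :
    ∃ m rest, rleCont c n cs = (c, m) :: rest := by
  induction cs generalizing n with
  | nil => exact ⟨n, [], rfl⟩
  | cons d cs ih =>
    by_cases h : c = d
    · simpa [rleCont, h] using ih (n + 1)
    · exact ⟨n, rleCont d 1 cs, by simp [rleCont, h]⟩

theorem foldl_addRun (cs : List Char) (done : List (Char × Int)) (c : Char) (n : Int) :
    cs.foldl addRun (done ++ [(c, n)]) = done ++ rleCont c n cs := by
  induction cs generalizing done c n with
  | nil => simp [rleCont]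
  | cons d cs ih =>
    by_cases h : c = d
    · subst h
      simpa [addRun, rleCont] using ih done c (n + 1)
    · have h1 : addRun (done ++ [(c, n)]) d = (done ++ [(c, n)]) ++ [(d, 1)] := by
        simp [addRun, h]
      simp only [List.foldl_cons, h1, rleCont, if_neg h]
      simpa using ih (done ++ [(c, n)]) d 1

theorem zip_foldl_eq_pairsRec (rs : List (Char × Int)) (r : Char × Int)
    (idx : Int) (ans : List String) :
    (((r :: rs).zip rs).foldl stepB (idx, ans)).2 = ans ++ pairsRec idx (r :: rs) := by
  induction rs generalizing r idx ans with
  | nil => simp [pairsRec]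
  | cons r2 rs ih =>
    obtain ⟨c1, n1⟩ := r
    obtain ⟨c2, n2⟩ := r2
    simp only [List.zip_cons_cons, List.foldl_cons]
    have h1 : stepB (idx, ans) ((c1, n1), (c2, n2)) =
        (idx + n1, ans ++ ["Time " ++ PySem.Int.toStr (idx + n1 - min n1 5) ++
          ": Go straight " ++ PySem.Int.toStr (min n1 5) ++ "00m and turn " ++
          direcCheck c1 c2]) := by
      simp [stepB, turnB_eq]
    rw [h1, ih ⟨c2, n2⟩]
    simp [pairsRec]

theorem loopA_eq (cs : List Char) (now : Char) (count time : Int) (acc : List String) :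
    (cs.foldl stepA (acc, now, time, count)).1 =
      acc ++ pairsRec (time + 1 - count) (rleCont now count cs) := by
  induction cs generalizing now count time acc with
  | nil => simp [rleCont, pairsRec]
  | cons d cs ih =>
    by_cases h : now = d
    · subst h
      have h1 : stepA (acc, now, time, count) now = (acc, now, time + 1, count + 1) := by
        simp [stepA]
      rw [List.foldl_cons, h1, ih now (count + 1) (time + 1) acc]
      have h2 : rleCont now count (now :: cs) = rleCont now (count + 1) cs := by
        simp [rleCont]
      rw [h2]
      congr 2
      omega
    · have h1 : stepA (acc, now, time, count) d =
          (acc ++ ["Time " ++ PySem.Int.toStr (time + 1 - (if count > 5 then 5 else count)) ++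
            ": Go straight " ++ PySem.Int.toStr (if count > 5 then 5 else count) ++
            "00m and turn " ++ direcCheck now d], d, time + 1, 1) := by
        simp [stepA, h]
      rw [List.foldl_cons, h1, ih d 1 (time + 1)]
      have h2 : rleCont now count (d :: cs) = (now, count) :: rleCont d 1 cs := by
        simp [rleCont, h]
      rw [h2]
      obtain ⟨m, rest, hr⟩ := rleCont_head cs d 1
      rw [hr]
      simp only [pairsRec, List.append_assoc, List.singleton_append]
      have h3 : time + 1 - count + count = time + 1 := by omega
      have h4 : (if count > 5 then (5 : Int) else count) = min count 5 := by
        rw [min_def]; split_ifs <;> omega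
      rw [h3, h4]
      congr 3
      omega

-- ===== VERDICT (by name: the statement is the Claim_ definition above) =====
theorem solution_spec : Claim_equal_solution := by
  intro path _ hpre
  unfold Spec_solution solution solution_alt
  have hne : path.toList ≠ [] := by
    intro hl
    exact hpre (by simpa using congrArg String.ofList hl)
  obtain ⟨c0, rest, hcs⟩ : ∃ c0 rest, path.toList = c0 :: rest :=
    List.exists_cons_of_ne_nil hne
  have hget : PySem.Str.pyGet? path 0 = some c0 := by
    simp [hcs]
  rw [hget]
  dsimp only
  rw [PySem.List.foldl_pyRange_pyGetD path.toList ' ' stepA ([], c0, 0, 1) (by norm_num : (0:Int) ≤ 1)]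
  rw [hcs]
  norm_num
  rw [loopA_eq rest c0 1 0 []]
  have hruns : List.foldl addRun (addRun [] c0) rest = rleCont c0 1 rest := by
    have h0 : addRun [] c0 = [] ++ [(c0, 1)] := by simp [addRun]
    rw [h0]
    simpa using foldl_addRun rest [] c0 1
  rw [hruns]
  obtain ⟨m, rest', hr⟩ := rleCont_head rest c0 1
  rw [hr]
  simp only [List.tail_cons]
  rw [zip_foldl_eq_pairsRec rest' (c0, m) 0 []]
  simp
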